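-- pv_equiv track=rewrite | github.com/BBSISK/mathappR15Dev | generate_lc_hl_coord_geom_v1.py | simplify_sqrt
-- ===== SOURCE A (Python) =====
-- import math
--
-- def simplify_sqrt(n):
--     """Simplify √n into a√b form, return (a, b)"""
--     if n <= 0:
--         return (0, 0)
--     a = 1
--     b = n
--     for i in range(int(math.sqrt(n)), 1, -1):
--         if n % (i * i) == 0:
--             a = i
--             b = n // (i * i)
--             break
--     return (a, b)
-- ===== SOURCE B (Python) =====
-- def simplify_sqrt(n):
--     """Simplify √n into a√b form, return (a, b)"""
--     if n <= 0:
--         return (0, 0)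
--     a = 1
--     b = 1
--     m = n
--     d = 2
--     while d * d <= m:
--         e = 0
--         while m % d == 0:
--             m //= d
--             e += 1
--         a *= d ** (e // 2)
--         b *= d ** (e % 2)
--         d += 1
--     if m > 1:
--         b *= m
--     return (a, b)
-- ===== Notes on version B (the rewrite author's own statement) =====
-- stated objective: alternative
-- what changed: B builds the answer from the prime factorisation by trial division over the shrinking remainder (accumulating d^(e//2) into a and d^(e%2) into b), instead of A's downward scan over all i in [2, isqrt(n)] testing n % (i*i) == 0.
import Mathlib
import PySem

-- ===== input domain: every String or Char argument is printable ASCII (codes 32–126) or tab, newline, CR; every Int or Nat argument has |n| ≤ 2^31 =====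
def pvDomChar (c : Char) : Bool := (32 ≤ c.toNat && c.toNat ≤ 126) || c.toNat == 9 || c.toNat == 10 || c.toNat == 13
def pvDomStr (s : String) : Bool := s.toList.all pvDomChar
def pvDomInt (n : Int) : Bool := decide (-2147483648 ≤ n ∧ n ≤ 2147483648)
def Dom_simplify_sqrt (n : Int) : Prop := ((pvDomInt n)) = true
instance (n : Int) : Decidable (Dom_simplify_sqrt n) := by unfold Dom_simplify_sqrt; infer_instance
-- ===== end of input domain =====

-- B replaces A's downward scan for the largest square divisor by trial-division
-- prime factorisation, accumulating d^(e//2) into a and d^(e%2) into b.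

-- ===== PORT A =====
-- int(math.sqrt(n)) is ported as the integer square root; this is exact for
-- 0 ≤ n ≤ 2^31 (the double sqrt of such n is far closer to √n than to any other integer).
def simplify_sqrt (n : Int) : Int × Int :=
  if n ≤ 0 then (0, 0)
  else
    match (PySem.List.pyRange (Nat.sqrt n.toNat : Int) 1 (-1)).find?
        (fun i => PySem.Int.mod n (i * i) == 0) with
    | some i => (i, PySem.Int.floordiv n (i * i))   -- first hit: a = i, b = n // (i*i), break
    | none => (1, n)                                 -- loop falls through: a = 1, b = n

-- ===== PORT B =====
-- inner 'while m % d == 0' loop of Source B: returns (remaining m, exponent e)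
def pvStrip (m d : Nat) : Nat × Nat :=
  if h : 2 ≤ d ∧ 1 ≤ m ∧ m % d = 0 then
    let r := pvStrip (m / d) d
    (r.1, r.2 + 1)
  else (m, 0)
termination_by m
decreasing_by exact Nat.div_lt_self (by omega) (by omega)

-- needed by pvLoop's termination measure
theorem pvStrip_fst_le (m d : Nat) : (pvStrip m d).1 ≤ m := by
  induction m using Nat.strong_induction_on with
  | _ m ih =>
    unfold pvStrip
    split
    · next h =>
      have := ih (m / d) (Nat.div_lt_self (by omega) (by omega))
      have hd : m / d ≤ m := Nat.div_le_self m d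
      simpa using le_trans this hd
    · simp

-- outer 'while d * d <= m' loop of Source B
def pvLoop (m d a b : Nat) : Nat × Nat :=
  if h : d * d ≤ m ∧ 2 ≤ d then
    let r := pvStrip m d
    pvLoop r.1 (d + 1) (a * d ^ (r.2 / 2)) (b * d ^ (r.2 % 2))
  else if 1 < m then (a, b * m) else (a, b)
termination_by m + 1 - d
decreasing_by
  have h1 := pvStrip_fst_le m d
  have hd : d ≤ m := le_trans (Nat.le_mul_of_pos_left d (by omega)) h.1
  omega

def simplify_sqrt_alt (n : Int) : Int × Int :=
  if n ≤ 0 then (0, 0)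
  else
    let r := pvLoop n.toNat 2 1 1
    ((r.1 : Int), (r.2 : Int))

-- ===== PRECONDITION & SPEC =====
def Spec_simplify_sqrt (n : Int) (out : Int × Int) : Prop := out = simplify_sqrt_alt n
instance (n : Int) (out : Int × Int) : Decidable (Spec_simplify_sqrt n out) := by unfold Spec_simplify_sqrt; infer_instance

-- ===== CLAIM (what is proved, stated in full; the proofs are below) =====
def Claim_equal_simplify_sqrt : Prop := ∀ (n : Int), Dom_simplify_sqrt n → Spec_simplify_sqrt n (simplify_sqrt n)

-- ===== LEMMAS AND PROOFS =====

-- Both programs produce a pair (a, b) with a*a*b = n, a > 0 and b squarefree; such a pair is unique.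
theorem pv_uniq {m a₁ b₁ a₂ b₂ : Nat} (hm : 1 ≤ m)
    (h1 : 0 < a₁) (e1 : a₁ * a₁ * b₁ = m) (s1 : Squarefree b₁)
    (h2 : 0 < a₂) (e2 : a₂ * a₂ * b₂ = m) (s2 : Squarefree b₂) :
    a₁ = a₂ ∧ b₁ = b₂ := by
  have hb1 : b₁ ≠ 0 := by rintro rfl; omega
  have hb2 : b₂ ≠ 0 := by rintro rfl; omega
  have ha1 : a₁ ≠ 0 := by omega
  have ha2 : a₂ ≠ 0 := by omega
  have ha : a₁ = a₂ := by
    apply Nat.eq_of_factorization_eq ha1 ha2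
    intro p
    have hf : (a₁ * a₁ * b₁).factorization p = (a₂ * a₂ * b₂).factorization p := by
      rw [e1, e2]
    rw [Nat.factorization_mul (by positivity) hb1, Nat.factorization_mul (by positivity) hb2,
        Nat.factorization_mul ha1 ha1, Nat.factorization_mul ha2 ha2] at hf
    simp only [Finsupp.add_apply] at hf
    have l1 := Squarefree.natFactorization_le_one p s1
    have l2 := Squarefree.natFactorization_le_one p s2
    omega
  subst ha
  refine ⟨rfl, ?_⟩
  have : a₁ * a₁ * b₁ = a₁ * a₁ * b₂ := by omega
  exact Nat.eq_of_mul_eq_mul_left (by positivity) this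

-- find? on a countdown range: no element strictly before the hit satisfies the predicate
theorem pv_find?_neg_one_first {p : Int → Bool} {b : Int} :
    ∀ (a i : Int), (PySem.List.pyRange a b (-1)).find? p = some i →
    ∀ x, i < x → x ≤ a → b < x → p x = false := by
  intro a
  induction hk : (a - b).toNat generalizing a with
  | zero =>
    intro i h
    rw [PySem.List.pyRange_neg_one_eq_nil (by omega)] at h
    simp at h
  | succ k ih =>
    intro i h x hix hxa hbx
    have hba : b < a := by omega
    rw [PySem.List.pyRange_neg_one_cons hba] at h
    rw [List.find?_cons] at h
    by_cases hpa : p a = true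
    · simp [hpa] at h
      subst h
      omega
    · simp [hpa] at h
      by_cases hxe : x = a
      · subst hxe; simpa using hpa
      · exact ih (a - 1) (by omega) i h x hix (by omega) hbx

-- A's result satisfies the characterisation
theorem pv_A_char (m : Nat) (hm : 1 ≤ m) :
    ∃ a b : Nat, simplify_sqrt (m : Int) = ((a : Int), (b : Int)) ∧
      0 < a ∧ a * a * b = m ∧ Squarefree b := by
  have hng : ¬ ((m : Int) ≤ 0) := by omega
  have htn : ((m : Int)).toNat = m := Int.toNat_natCast m
  set s : Nat := Nat.sqrt m with hs
  set pr : Int → Bool := fun i => PySem.Int.mod (m : Int) (i * i) == 0 with hpr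
  have hpred : ∀ x : Int, pr x = true ↔ (x * x) ∣ (m : Int) := by
    intro x
    simp [hpr, PySem.Int.mod_eq_zero_iff_dvd]
  cases hf : (PySem.List.pyRange (s : Int) 1 (-1)).find? pr with
  | some i =>
    have hmem := List.mem_of_find?_eq_some hf
    rw [PySem.List.mem_pyRange_neg_one] at hmem
    obtain ⟨hi1, his⟩ := hmem
    have hptrue : pr i = true := List.find?_some hf
    have hidvd : (i * i) ∣ (m : Int) := (hpred i).mp hptrue
    set j : Nat := i.toNat with hj
    have hij : (j : Int) = i := Int.toNat_of_nonneg (by omega)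
    have hj2 : 2 ≤ j := by omega
    have hjd : j * j ∣ m := by
      have : ((j * j : Nat) : Int) ∣ (m : Int) := by push_cast; rw [hij]; exact hidvd
      exact_mod_cast this
    refine ⟨j, m / (j * j), ?_, by omega, Nat.mul_div_cancel' hjd, ?_⟩
    · simp only [simplify_sqrt, if_neg hng, htn]
      rw [← hs, ← hpr, hf]
      rw [← hij]
      have : PySem.Int.floordiv ((m : Nat) : Int) (((j : Int)) * (j : Int)) =
          ((m / (j * j) : Nat) : Int) := by
        push_cast
        exact_mod_cast PySem.Int.floordiv_natCast m (j * j)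
      simp [this]
    · apply Nat.squarefree_iff_prime_squarefree.mpr
      intro q hq hqq
      have hb := Nat.mul_div_cancel' hjd
      have hbig : (j * q) * (j * q) ∣ m := by
        obtain ⟨c, hc⟩ := hqq
        refine ⟨c, ?_⟩
        rw [← hb, hc]; ring
      have hle : j * q ≤ s := by
        rw [hs]
        exact Nat.le_sqrt.mpr (Nat.le_of_dvd (by omega) hbig)
      have hq2 := hq.two_le
      have hfalse := pv_find?_neg_one_first (s : Int) i hf ((j * q : Nat) : Int)
        (by push_cast; rw [hij]; nlinarith) (by exact_mod_cast hle) (by push_cast; nlinarith)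
      rw [(hpred _).mpr] at hfalse
      · exact absurd hfalse (by simp)
      · exact_mod_cast Int.natCast_dvd_natCast.mpr hbig
  | none =>
    refine ⟨1, m, ?_, by omega, by omega, ?_⟩
    · simp only [simplify_sqrt, if_neg hng, htn]
      rw [← hs, ← hpr, hf]
      simp
    · apply Nat.squarefree_iff_prime_squarefree.mpr
      intro q hq hqq
      have hq2 := hq.two_le
      have hle : q ≤ s := by
        rw [hs]; exact Nat.le_sqrt.mpr (Nat.le_of_dvd (by omega) hqq)
      have hnone := List.find?_eq_none.mp hf ((q : Nat) : Int)
        (by rw [PySem.List.mem_pyRange_neg_one]; constructor <;> [exact_mod_cast (by omega : (1:Int) < q); exact_mod_cast hle])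
      apply hnone
      rw [hpred]
      exact_mod_cast Int.natCast_dvd_natCast.mpr hqq

-- the inner loop divides out exactly the full power of d
theorem pv_strip_spec (m d : Nat) (hd : 2 ≤ d) :
    m = d ^ (pvStrip m d).2 * (pvStrip m d).1 ∧ (1 ≤ m → ¬ d ∣ (pvStrip m d).1) := by
  induction m using Nat.strong_induction_on with
  | _ m ih =>
    unfold pvStrip
    split
    · next h =>
      have hdvd : d ∣ m := Nat.dvd_of_mod_eq_zero h.2.2
      have hlt : m / d < m := Nat.div_lt_self (by omega) (by omega)
      have hpos : 1 ≤ m / d := Nat.one_le_div_iff (by omega) |>.mpr (Nat.le_of_dvd (by omega) hdvd)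
      obtain ⟨he, hnd⟩ := ih (m / d) hlt
      constructor
      · simp only [pow_succ]
        calc m = d * (m / d) := (Nat.mul_div_cancel' hdvd).symm
        _ = d * (d ^ (pvStrip (m / d) d).2 * (pvStrip (m / d) d).1) := by rw [← he]
        _ = d ^ (pvStrip (m / d) d).2 * d * (pvStrip (m / d) d).1 := by ring
      · intro _
        exact hnd hpos
    · next h =>
      constructor
      · simp
      · intro hm
        simp only []
        intro hdvd
        exact h ⟨hd, hm, Nat.mod_eq_zero_of_dvd hdvd⟩

-- outer-loop invariant: pvLoop multiplies (a, b) by (α, β) with α*α*β = m, β squarefree,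
-- provided every prime factor of m is ≥ d
theorem pv_loop_spec_aux : ∀ (k m d a b : Nat), m + 1 - d ≤ k → 2 ≤ d → 1 ≤ m →
    (∀ p, p.Prime → p ∣ m → d ≤ p) →
    ∃ α β : Nat, pvLoop m d a b = (a * α, b * β) ∧
      α * α * β = m ∧ Squarefree β ∧ 0 < α := by
  intro k
  induction k with
  | zero =>
    intro m d a b hk hd hm hp
    have hguard : ¬ (d * d ≤ m ∧ 2 ≤ d) := by
      rintro ⟨h1, _⟩
      have : d ≤ d * d := Nat.le_mul_of_pos_left d (by omega)
      omega
    rw [pvLoop, dif_neg hguard]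
    by_cases h1 : 1 < m
    · exfalso
      obtain ⟨q, hq, hqd⟩ := Nat.exists_prime_and_dvd (show m ≠ 1 by omega)
      have h2 := hp q hq hqd
      have h3 := Nat.le_of_dvd (by omega) hqd
      omega
    · have : m = 1 := by omega
      subst this
      rw [if_neg h1]
      exact ⟨1, 1, by simp, by simp, squarefree_one, one_pos⟩
  | succ k ih =>
    intro m d a b hk hd hm hp
    by_cases hguard : d * d ≤ m ∧ 2 ≤ d
    · rw [pvLoop, dif_pos hguard]
      obtain ⟨hfac, hnd⟩ := pv_strip_spec m d hd
      set m' := (pvStrip m d).1 with hm'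
      set e := (pvStrip m d).2 with he
      have hndm' : ¬ d ∣ m' := hnd hm
      have hm'le : m' ≤ m := pvStrip_fst_le m d
      have hm'pos : 1 ≤ m' := by
        rcases Nat.eq_zero_or_pos m' with h | h
        · rw [h, Nat.mul_zero] at hfac; omega
        · exact h
      have hm'dvd : m' ∣ m := ⟨d ^ e, by rw [hfac]; ring⟩
      have hdm : d ≤ m := le_trans (Nat.le_mul_of_pos_left d (by omega)) hguard.1
      obtain ⟨α', β', hrec, heq, hsf, hα'⟩ := ih m' (d + 1) (a * d ^ (e / 2)) (b * d ^ (e % 2))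
        (by omega) (by omega) hm'pos
        (by
          intro p hprime hpdvd
          have h1 : d ≤ p := hp p hprime (hpdvd.trans hm'dvd)
          have h2 : p ≠ d := by rintro rfl; exact hndm' hpdvd
          omega)
      refine ⟨d ^ (e / 2) * α', d ^ (e % 2) * β', by rw [hrec]; ring_nf, ?_, ?_, ?_⟩
      · have hpow : d ^ (e / 2) * (d ^ (e / 2)) * d ^ (e % 2) = d ^ e := by
          rw [← pow_add, ← pow_add]
          congr 1
          omega
        calc d ^ (e / 2) * α' * (d ^ (e / 2) * α') * (d ^ (e % 2) * β')
            = (d ^ (e / 2) * d ^ (e / 2) * d ^ (e % 2)) * (α' * α' * β') := by ring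
          _ = d ^ e * m' := by rw [hpow, heq]
          _ = m := hfac.symm
      · rcases Nat.mod_two_eq_zero_or_one e with h2 | h2
        · simpa [h2] using hsf
        · have hepos : 1 ≤ e := by
            rcases Nat.eq_zero_or_pos e with h | h
            · rw [h] at h2; simp at h2
            · exact h
          have hddvd : d ∣ m := by
            rw [hfac]
            exact Dvd.dvd.mul_right (dvd_pow_self d (by omega)) m'
          have hdprime : d.Prime := by
            have hq := Nat.minFac_prime (show d ≠ 1 by omega)
            have h1 : d ≤ d.minFac := hp d.minFac hq ((Nat.minFac_dvd d).trans hddvd)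
            have h2 : d.minFac ≤ d := Nat.minFac_le (by omega)
            have : d.minFac = d := by omega
            rwa [← this]
          have hndβ : ¬ d ∣ β' := by
            intro hdb
            exact hndm' (hdb.trans ⟨α' * α', by rw [← heq]; ring⟩)
          have hcop : Nat.Coprime d β' := (Nat.Prime.coprime_iff_not_dvd hdprime).mpr hndβ
          rw [h2, pow_one]
          exact (Nat.squarefree_mul hcop).mpr ⟨hdprime.squarefree, hsf⟩
      · have : 0 < d ^ (e / 2) := pow_pos (by omega) _
        positivity
    · rw [pvLoop, dif_neg hguard]
      by_cases h1 : 1 < m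
      · rw [if_pos h1]
        refine ⟨1, m, by simp, by ring, ?_, one_pos⟩
        apply Nat.squarefree_iff_prime_squarefree.mpr
        intro q hq hqq
        have hqd : d ≤ q := hp q hq (dvd_trans (Dvd.intro_left q rfl) hqq)
        have hle : q * q ≤ m := Nat.le_of_dvd (by omega) hqq
        have : ¬ d * d ≤ m := fun h => hguard ⟨h, hd⟩
        nlinarith
      · have : m = 1 := by omega
        subst this
        rw [if_neg h1]
        exact ⟨1, 1, by simp, by simp, squarefree_one, one_pos⟩

-- B's result satisfies the characterisation
theorem pv_B_char (m : Nat) (hm : 1 ≤ m) :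
    ∃ a b : Nat, simplify_sqrt_alt (m : Int) = ((a : Int), (b : Int)) ∧
      0 < a ∧ a * a * b = m ∧ Squarefree b := by
  obtain ⟨α, β, h, heq, hsf, hα⟩ := pv_loop_spec_aux (m + 1 - 2) m 2 1 1 le_rfl le_rfl hm
    (fun p hp _ => hp.two_le)
  refine ⟨α, β, ?_, hα, heq, hsf⟩
  simp only [simplify_sqrt_alt, if_neg (show ¬ ((m : Int) ≤ 0) by omega), Int.toNat_natCast]
  rw [h]
  simp

-- ===== VERDICT (by name: the statement is the Claim_ definition above) =====
theorem simplify_sqrt_spec : Claim_equal_simplify_sqrt := by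
  intro n _
  unfold Spec_simplify_sqrt
  by_cases hn : n ≤ 0
  · simp [simplify_sqrt, simplify_sqrt_alt, hn]
  · have hm : 1 ≤ n.toNat := by omega
    have hcast : ((n.toNat : Int)) = n := Int.toNat_of_nonneg (by omega)
    obtain ⟨a₁, b₁, hA, p1, e1, s1⟩ := pv_A_char n.toNat hm
    obtain ⟨a₂, b₂, hB, p2, e2, s2⟩ := pv_B_char n.toNat hm
    rw [hcast] at hA hB
    obtain ⟨ha, hb⟩ := pv_uniq hm p1 e1 s1 p2 e2 s2
    rw [hA, hB, ha, hb]
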